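-- pv_equiv track=rewrite | github.com/jonasrenault/advent | advent/advent2018/day08.py | read_metadatas
-- ===== SOURCE A (Python) =====
-- def read_metadatas(numbers: list[int]) -> list[int]:
--     children = numbers.pop(0)
--     metadatas = numbers.pop(0)
--     metadata = []
--     for _ in range(children):
--         metadata.extend(read_metadatas(numbers))
--     metadata.extend([numbers.pop(0) for _ in range(metadatas)])
--     return metadata
-- ===== SOURCE B (Python) =====
-- def read_metadatas(numbers: list[int]) -> list[int]:
--     # Iterative DFS with an explicit stack of [remaining_children, meta_count]
--     # frames instead of recursion; pops from `numbers` in the same order as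
--     # the recursive version (same mutation, same IndexError behaviour).
--     result = []
--     stack = [[numbers.pop(0), numbers.pop(0)]]
--     while stack:
--         top = stack[-1]
--         if top[0] > 0:
--             top[0] -= 1
--             stack.append([numbers.pop(0), numbers.pop(0)])
--         else:
--             stack.pop()
--             for _ in range(top[1]):
--                 result.append(numbers.pop(0))
--     return result
-- ===== Notes on version B (the rewrite author's own statement) =====
-- stated objective: alternative
-- what changed: Replaces the recursive descent with an iterative depth-first traversal over an explicit stack of [remaining_children, meta_count] frames, collecting metadata post-order in one while loop.
import Mathlib
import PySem

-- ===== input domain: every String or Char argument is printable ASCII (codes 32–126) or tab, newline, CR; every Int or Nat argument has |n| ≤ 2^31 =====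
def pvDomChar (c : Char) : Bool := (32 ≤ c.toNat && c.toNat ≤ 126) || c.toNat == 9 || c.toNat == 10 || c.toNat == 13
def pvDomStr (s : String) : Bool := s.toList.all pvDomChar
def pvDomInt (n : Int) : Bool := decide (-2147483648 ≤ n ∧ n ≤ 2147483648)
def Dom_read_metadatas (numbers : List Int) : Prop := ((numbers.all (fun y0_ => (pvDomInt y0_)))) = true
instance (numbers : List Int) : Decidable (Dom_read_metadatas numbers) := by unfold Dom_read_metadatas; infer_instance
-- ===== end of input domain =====

-- B replaces A's recursion by an iterative DFS over an explicit stack of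
-- (remaining_children, meta_count) frames; same return value, and the Python B
-- performs the same pop(0) mutation of `numbers` as A.

-- Shared helper: pop k elements one by one from the front (Python's repeated
-- numbers.pop(0)); none exactly when the list runs out (IndexError).
def pvPopN : Nat → List Int → Option (List Int × List Int)
  | 0, ns => some ([], ns)
  | _+1, [] => none
  | k+1, x :: ns =>
    match pvPopN k ns with
    | some (ms, r) => some (x :: ms, r)
    | none => none

-- ===== PORT A =====
-- A's `for _ in range(children): metadata.extend(read_metadatas(numbers))`,
-- with the recursive call abstracted (g = A at smaller fuel).
def aChildren (g : List Int → Option (List Int × List Int)) :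
    Nat → List Int → Option (List Int × List Int)
  | 0, ns => some ([], ns)
  | k+1, ns =>
    match g ns with
    | some (md, ns') =>
      match aChildren g k ns' with
      | some (md', ns'') => some (md ++ md', ns'')
      | none => none
    | none => none

-- A on the mutable list: returns (metadata, remaining numbers); none = IndexError.
-- Fuel (structural) is a totality guard only: it bounds recursion depth.
def aAux : Nat → List Int → Option (List Int × List Int)
  | 0, _ => none
  | f+1, c :: m :: rest =>
    match aChildren (fun ns => aAux f ns) c.toNat rest with
    | some (md, rest') =>
      match pvPopN m.toNat rest' with
      | some (ms, r) => some (md ++ ms, r)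
      | none => none
    | none => none
  | _+1, _ => none

def read_metadatas (numbers : List Int) : List Int :=
  match aAux (numbers.length + 1) numbers with
  | some (md, _) => md
  | none => []

-- ===== PORT B =====
-- B's while loop: stack of (remaining_children, meta_count); fuel is a
-- totality guard only (each iteration consumes one unit).
def bLoop : Nat → List (Int × Int) → List Int → List Int → Option (List Int × List Int)
  | _, [], ns, acc => some (acc, ns)
  | 0, _ :: _, _, _ => none
  | f+1, (rc, mc) :: stk, ns, acc =>
    if 0 < rc then
      match ns with
      | c :: m :: rest => bLoop f ((c, m) :: (rc - 1, mc) :: stk) rest acc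
      | _ => none
    else
      match pvPopN mc.toNat ns with
      | some (ms, rest) => bLoop f stk rest (acc ++ ms)
      | none => none

def read_metadatas_alt (numbers : List Int) : List Int :=
  match numbers with
  | c :: m :: rest =>
    match bLoop (numbers.length + 1) [(c, m)] rest [] with
    | some (md, _) => md
    | none => []
  | _ => []

-- ===== PRECONDITION & SPEC =====
-- Pre_: `numbers` starts with a complete node encoding (header c m, then
-- max(c,0) child encodings, then max(m,0) metadata entries; a trailing tail is
-- allowed) — exactly the inputs on which A returns (elsewhere A raises
-- IndexError while popping).  This language of encodings is inherently
-- recursive, so membership is stated via the grammar acceptor pvShape (it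
-- checks only the SHAPE: it collects no metadata and is not either port's
-- recursion); its fuel argument is a structural-recursion guard bounding
-- nesting depth, and numbers.length + 1 always suffices since every node
-- encoding is at least 2 entries long.
def pvShapeN (g : List Int → Option (List Int)) : Nat → List Int → Option (List Int)
  | 0, ns => some ns
  | k+1, ns =>
    match g ns with
    | some ns' => pvShapeN g k ns'
    | none => none

def pvShape : Nat → List Int → Option (List Int)
  | 0, _ => none
  | f+1, c :: m :: rest =>
    match pvShapeN (fun ns => pvShape f ns) c.toNat rest with
    | some rest' => if m.toNat ≤ rest'.length then some (rest'.drop m.toNat) else none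
    | none => none
  | _+1, _ => none

def Pre_read_metadatas (numbers : List Int) : Prop :=
  (pvShape (numbers.length + 1) numbers).isSome = true

instance (numbers : List Int) : Decidable (Pre_read_metadatas numbers) := by
  unfold Pre_read_metadatas; infer_instance

def pvWitness_read_metadatas : List Int :=
  [2, 3, 0, 3, 10, 11, 12, 1, 1, 0, 1, 99, 2, 1, 1, 2]

def Spec_read_metadatas (numbers : List Int) (out : List Int) : Prop := out = read_metadatas_alt numbers
instance (numbers : List Int) (out : List Int) : Decidable (Spec_read_metadatas numbers out) := by unfold Spec_read_metadatas; infer_instance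

-- ===== CLAIM (what is proved, stated in full; the proofs are below) =====
def Claim_equal_read_metadatas : Prop := ∀ (numbers : List Int), Dom_read_metadatas numbers → Pre_read_metadatas numbers → Spec_read_metadatas numbers (read_metadatas numbers)

-- ===== LEMMAS AND PROOFS =====

theorem pvPopN_length {k : Nat} {ns ms r : List Int}
    (h : pvPopN k ns = some (ms, r)) : r.length ≤ ns.length := by
  induction k generalizing ns ms r with
  | zero => simp [pvPopN] at h; simp [h.2]
  | succ k ih =>
    cases ns with
    | nil => simp [pvPopN] at h
    | cons x ns =>
      simp only [pvPopN] at h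
      cases hp : pvPopN k ns with
      | none => rw [hp] at h; simp at h
      | some p =>
        obtain ⟨ms', r'⟩ := p
        rw [hp] at h; simp at h
        have := ih hp
        simp [← h.2]; omega

theorem pvPopN_take {k : Nat} {ns : List Int} (h : k ≤ ns.length) :
    pvPopN k ns = some (ns.take k, ns.drop k) := by
  induction k generalizing ns with
  | zero => simp [pvPopN]
  | succ k ih =>
    cases ns with
    | nil => simp at h
    | cons x ns =>
      simp at h
      simp [pvPopN, ih h]

-- pvShape succeeds ⇒ A's parser succeeds with the same remaining tail.
theorem shape_sound : ∀ f : Nat,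
    (∀ ns r : List Int, pvShape f ns = some r → ∃ md, aAux f ns = some (md, r)) ∧
    (∀ (k : Nat) (ns r : List Int), pvShapeN (fun ns => pvShape f ns) k ns = some r →
      ∃ md, aChildren (fun ns => aAux f ns) k ns = some (md, r)) := by
  intro f
  induction f with
  | zero =>
    constructor
    · intro ns r h; simp [pvShape] at h
    · intro k ns r h
      cases k with
      | zero => simp [pvShapeN] at h; exact ⟨[], by simp [aChildren, h]⟩
      | succ k => simp [pvShapeN, pvShape] at h
  | succ f ih =>
    have h1 : ∀ ns r : List Int, pvShape (f+1) ns = some r →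
        ∃ md, aAux (f+1) ns = some (md, r) := by
      intro ns r h
      match ns with
      | [] => simp [pvShape] at h
      | [_] => simp [pvShape] at h
      | c :: m :: rest =>
        simp only [pvShape] at h
        cases hs : pvShapeN (fun ns => pvShape f ns) c.toNat rest with
        | none => rw [hs] at h; simp at h
        | some rest' =>
          rw [hs] at h; simp at h
          obtain ⟨hle', hr⟩ := h
          have hle : m.toNat ≤ rest'.length := by omega
          obtain ⟨md, hmd⟩ := ih.2 c.toNat rest rest' hs
          refine ⟨md ++ rest'.take m.toNat, ?_⟩
          simp [aAux, hmd, pvPopN_take hle, hr]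
    refine ⟨h1, ?_⟩
    intro k
    induction k with
    | zero => intro ns r h; simp [pvShapeN] at h; exact ⟨[], by simp [aChildren, h]⟩
    | succ k ihk =>
      intro ns r h
      simp only [pvShapeN] at h
      cases hs : pvShape (f+1) ns with
      | none => rw [hs] at h; simp at h
      | some ns' =>
        rw [hs] at h
        obtain ⟨md, hmd⟩ := h1 ns ns' hs
        obtain ⟨md', hmd'⟩ := ihk ns' r h
        exact ⟨md ++ md', by simp [aChildren, hmd, hmd']⟩

-- Simulation: resolving one node / one run of children in B's loop equals the
-- recursive computation, consuming a definite amount δ of fuel.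
theorem sim : ∀ f : Nat,
    (∀ (c m : Int) (rest md r : List Int), aAux f (c :: m :: rest) = some (md, r) →
      ∀ (stk : List (Int × Int)) (acc : List Int),
        ∃ δ, δ + r.length ≤ rest.length + 1 ∧
          ∀ fb, bLoop (fb + δ) ((c, m) :: stk) rest acc = bLoop fb stk r (acc ++ md)) ∧
    (∀ (k : Nat) (rc : Int), rc.toNat = k → ∀ (ns md r : List Int),
      aChildren (fun ns => aAux f ns) k ns = some (md, r) →
      ∀ (mc : Int) (stk : List (Int × Int)) (acc : List Int),
        ∃ δ, δ + r.length ≤ ns.length ∧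
          ∀ fb, bLoop (fb + δ) ((rc, mc) :: stk) ns acc
              = bLoop fb ((rc - k, mc) :: stk) r (acc ++ md)) := by
  intro f
  induction f with
  | zero =>
    constructor
    · intro c m rest md r h; simp [aAux] at h
    · intro k rc hk ns md r h mc stk acc
      cases k with
      | zero =>
        simp [aChildren] at h
        exact ⟨0, by simp [h.2], fun fb => by simp [h.1, ← h.2]⟩
      | succ k => simp [aChildren, aAux] at h
  | succ f ih =>
    have h1 : ∀ (c m : Int) (rest md r : List Int),
        aAux (f+1) (c :: m :: rest) = some (md, r) →
        ∀ (stk : List (Int × Int)) (acc : List Int),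
          ∃ δ, δ + r.length ≤ rest.length + 1 ∧
            ∀ fb, bLoop (fb + δ) ((c, m) :: stk) rest acc = bLoop fb stk r (acc ++ md) := by
      intro c m rest md r ha stk acc
      simp only [aAux] at ha
      cases hc : aChildren (fun ns => aAux f ns) c.toNat rest with
      | none => rw [hc] at ha; simp at ha
      | some pc =>
        obtain ⟨mdc, rest'⟩ := pc
        simp only [hc] at ha
        cases hp : pvPopN m.toNat rest' with
        | none => simp [hp] at ha
        | some pp =>
          obtain ⟨ms, rr⟩ := pp
          simp only [hp] at ha
          simp at ha
          obtain ⟨hmd, hrr⟩ := ha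
          obtain ⟨δc, hδc, hbc⟩ := ih.2 c.toNat c rfl rest mdc rest' hc m stk acc
          have hrl : rr.length ≤ rest'.length := pvPopN_length hp
          refine ⟨δc + 1, by subst hrr; omega, ?_⟩
          intro fb
          have e1 : fb + (δc + 1) = (fb + 1) + δc := by omega
          rw [e1, hbc]
          have hneg : ¬ (0 : Int) < c - c.toNat := by omega
          simp only [bLoop, if_neg hneg, hp]
          rw [← hmd, ← hrr, List.append_assoc]
    refine ⟨h1, ?_⟩
    intro k
    induction k with
    | zero =>
      intro rc hk ns md r h mc stk acc
      simp [aChildren] at h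
      exact ⟨0, by simp [h.2], fun fb => by simp [h.1, ← h.2]⟩
    | succ k ihk =>
      intro rc hk ns md r h mc stk acc
      have hrc : 0 < rc := by omega
      simp only [aChildren] at h
      cases ha : aAux (f+1) ns with
      | none => rw [ha] at h; simp at h
      | some p =>
        obtain ⟨md1, ns'⟩ := p
        simp only [ha] at h
        cases hl : aChildren (fun ns => aAux (f+1) ns) k ns' with
        | none => simp [hl] at h
        | some q =>
          obtain ⟨md2, r'⟩ := q
          simp only [hl] at h
          simp at h
          obtain ⟨hmd, hr⟩ := h
          match ns with
          | [] => simp [aAux] at ha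
          | [_] => simp [aAux] at ha
          | c :: m :: rest =>
            obtain ⟨δ1, hδ1, hb1⟩ := h1 c m rest md1 ns' ha ((rc - 1, mc) :: stk) acc
            obtain ⟨δ2, hδ2, hb2⟩ := ihk (rc - 1) (by omega) ns' md2 r (by rw [hl, hr]) mc stk (acc ++ md1)
            refine ⟨1 + δ1 + δ2, by simp; omega, ?_⟩
            intro fb
            have e1 : fb + (1 + δ1 + δ2) = ((fb + δ2) + δ1) + 1 := by omega
            rw [e1]
            simp only [bLoop, if_pos hrc]
            rw [hb1, hb2]
            have e2 : rc - 1 - (k : Int) = rc - ((k : Nat) + 1 : Int) := by ring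
            rw [← hmd, List.append_assoc]
            norm_num [e2]

-- ===== VERDICT (by name: the statement is the Claim_ definition above) =====
theorem read_metadatas_spec : Claim_equal_read_metadatas := by
  intro numbers _ hpre
  unfold Spec_read_metadatas
  unfold Pre_read_metadatas at hpre
  rw [Option.isSome_iff_exists] at hpre
  obtain ⟨tail, hsh⟩ := hpre
  obtain ⟨md, hmd⟩ := (shape_sound (numbers.length + 1)).1 numbers tail hsh
  match numbers, hmd with
  | [], hmd => simp [aAux] at hmd
  | [_], hmd => simp [aAux] at hmd
  | c :: m :: rest, hmd =>
    obtain ⟨δ, hδ, hb⟩ := (sim ((c :: m :: rest).length + 1)).1 c m rest md tail hmd [] []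
    have hfuel : (c :: m :: rest).length + 1 = ((c :: m :: rest).length + 1 - δ) + δ := by
      simp at hδ ⊢; omega
    simp only [read_metadatas, read_metadatas_alt, hmd]
    rw [hfuel, hb]
    simp [bLoop]
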